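-- pv_equiv track=rewrite | github.com/AlmirMBH/dsai | PIP1/Assignment3/a_shaped_sequence.py | is_a_shaped_sequence
-- ===== SOURCE A (Python) =====
-- def is_a_shaped_sequence(numbers):
--     n = len(numbers)
--
--     if n < 3:
--         return False
--
--     peak_index = numbers.index(max(numbers))
--
--     # The peak in the first or last position eliminates A-shape
--     if peak_index == 0 or peak_index == n - 1:
--         return False
--
--     for i in range(1, peak_index + 1):
--         if numbers[i] <= numbers[i - 1]:  # Must be increasing (no duplicates)
--             return False
--
--     for i in range(peak_index + 1, n):
--         if numbers[i] >= numbers[i - 1]:  # Must be decreasing (no duplicates)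
--             return False
--
--     return True
-- ===== SOURCE B (Python) =====
-- def is_a_shaped_sequence(numbers):
--     if len(numbers) < 3:
--         return False
--     phase = 0  # 0 = ascending, 1 = descending, 2 = failed
--     prev = numbers[0]
--     rose = False
--     for x in numbers[1:]:
--         if phase == 0:
--             if prev < x:
--                 rose = True
--             elif rose and x < prev:
--                 phase = 1
--             else:
--                 phase = 2
--         elif phase == 1:
--             if prev <= x:
--                 phase = 2
--         prev = x
--     return phase == 1
-- ===== Notes on version B (the rewrite author's own statement) =====
-- stated objective: alternative
-- what changed: Replaced A's global-max + index lookup + two index-range verification loops by a single forward state-machine pass (ascending/descending/failed) over the elements.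
import Mathlib
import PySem

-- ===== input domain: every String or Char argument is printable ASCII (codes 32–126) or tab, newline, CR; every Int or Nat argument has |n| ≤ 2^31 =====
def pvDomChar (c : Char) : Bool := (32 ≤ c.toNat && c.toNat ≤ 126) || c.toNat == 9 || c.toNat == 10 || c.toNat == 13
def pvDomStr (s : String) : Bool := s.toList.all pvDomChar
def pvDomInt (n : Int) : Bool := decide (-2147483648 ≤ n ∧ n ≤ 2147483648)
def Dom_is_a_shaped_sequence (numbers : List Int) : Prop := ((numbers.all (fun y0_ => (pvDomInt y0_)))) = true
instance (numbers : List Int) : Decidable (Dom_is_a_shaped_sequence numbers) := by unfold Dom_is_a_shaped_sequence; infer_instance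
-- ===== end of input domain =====

-- B replaces A's global-max + first-index + two verification loops by one forward
-- state-machine pass (ascending / descending / failed); same O(n) cost, different algorithm.

-- ===== PORT A =====
-- Literal port of A: length guard, peak = first index of max, position guard,
-- then the two early-return range loops rendered as `all` over the same ranges.
def is_a_shaped_sequence (numbers : List Int) : Bool :=
  if numbers.length < 3 then false
  else
    match PySem.List.max? numbers (fun y => y) with
    | none => false   -- unreachable: length ≥ 3 so the list is nonempty (Python's max raises only on [])
    | some m =>
      match PySem.List.index? numbers m with
      | none => false -- unreachable: m is a member
      | some p =>
        if p = 0 ∨ p = numbers.length - 1 then false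
        else
          ((PySem.List.pyRange 1 ((p : Int) + 1) 1).all
              (fun i => !decide (PySem.List.pyGetD numbers i 0 ≤ PySem.List.pyGetD numbers (i - 1) 0))) &&
          ((PySem.List.pyRange ((p : Int) + 1) (numbers.length : Int) 1).all
              (fun i => !decide (PySem.List.pyGetD numbers (i - 1) 0 ≤ PySem.List.pyGetD numbers i 0)))

-- ===== PORT B =====
-- the loop body of Source B: state (phase, prev, rose); phase 0 = ascending, 1 = descending, 2 = failed
def pvStep (s : Nat × Int × Bool) (x : Int) : Nat × Int × Bool :=
  match s with
  | (phase, prev, rose) =>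
    if phase = 0 then
      if prev < x then (0, x, true)
      else if rose = true ∧ x < prev then (1, x, rose)
      else (2, x, rose)
    else if phase = 1 then
      if prev ≤ x then (2, x, rose) else (phase, x, rose)
    else (phase, x, rose)

def is_a_shaped_sequence_alt (numbers : List Int) : Bool :=
  if numbers.length < 3 then false
  else
    match numbers with
    | [] => false  -- unreachable under the length guard
    | h :: t => decide ((t.foldl pvStep (0, h, false)).1 = 1)

-- ===== PRECONDITION & SPEC =====
def Spec_is_a_shaped_sequence (numbers : List Int) (out : Bool) : Prop := out = is_a_shaped_sequence_alt numbers
instance (numbers : List Int) (out : Bool) : Decidable (Spec_is_a_shaped_sequence numbers out) := by unfold Spec_is_a_shaped_sequence; infer_instance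

-- ===== CLAIM (what is proved, stated in full; the proofs are below) =====
def Claim_equal_is_a_shaped_sequence : Prop := ∀ (numbers : List Int), Dom_is_a_shaped_sequence numbers → Spec_is_a_shaped_sequence numbers (is_a_shaped_sequence numbers)

-- ===== LEMMAS AND PROOFS =====

-- index formulation of "strictly increasing up to p" / "strictly decreasing from p on"
def ascTo (xs : List Int) (p : Nat) : Prop := ∀ i, i < p → xs.getD i 0 < xs.getD (i+1) 0
def descFrom (xs : List Int) (p : Nat) : Prop := ∀ i, p ≤ i → i + 1 < xs.length → xs.getD (i+1) 0 < xs.getD i 0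
def mtn (xs : List Int) : Prop := ∃ p, 0 < p ∧ p + 1 < xs.length ∧ ascTo xs p ∧ descFrom xs p

-- recursive character of B's two phases
def downSpec : Int → List Int → Bool
  | _, [] => true
  | prev, x :: t => decide (x < prev) && downSpec x t

def upSpec : Int → List Int → Bool → Bool
  | _, [], _ => false
  | prev, x :: t, rose =>
      if prev < x then upSpec x t true
      else rose && decide (x < prev) && downSpec x t

theorem bfold_fail : ∀ (t : List Int) (prev : Int) (rose : Bool),
    (t.foldl pvStep (2, prev, rose)).1 = 2 := by
  intro t
  induction t with
  | nil => intro prev rose; simp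
  | cons x t ih => intro prev rose; simpa [pvStep] using ih x rose

theorem bfold_down : ∀ (t : List Int) (prev : Int) (rose : Bool),
    ((t.foldl pvStep (1, prev, rose)).1 = 1) ↔ (downSpec prev t = true) := by
  intro t
  induction t with
  | nil => intro prev rose; simp [downSpec]
  | cons x t ih =>
    intro prev rose
    rw [List.foldl_cons,
        show downSpec prev (x :: t) = (decide (x < prev) && downSpec x t) from rfl]
    by_cases h : prev ≤ x
    · rw [show pvStep (1, prev, rose) x = (2, x, rose) from by simp [pvStep, h]]
      have h2 := bfold_fail t x rose
      constructor
      · intro hc; omega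
      · intro hc
        simp only [Bool.and_eq_true, decide_eq_true_eq] at hc
        omega
    · rw [show pvStep (1, prev, rose) x = (1, x, rose) from by simp [pvStep, h]]
      rw [ih x rose]
      simp only [Bool.and_eq_true, decide_eq_true_eq]
      constructor
      · intro hd; exact ⟨by omega, hd⟩
      · intro hd; exact hd.2

theorem bfold_up : ∀ (t : List Int) (prev : Int) (rose : Bool),
    ((t.foldl pvStep (0, prev, rose)).1 = 1) ↔ (upSpec prev t rose = true) := by
  intro t
  induction t with
  | nil => intro prev rose; simp [upSpec]
  | cons x t ih =>
    intro prev rose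
    rw [List.foldl_cons]
    by_cases h : prev < x
    · rw [show pvStep (0, prev, rose) x = (0, x, true) from by simp [pvStep, h],
          show upSpec prev (x :: t) rose = upSpec x t true from by simp [upSpec, h]]
      exact ih x true
    · rw [show upSpec prev (x :: t) rose = (rose && decide (x < prev) && downSpec x t) from by
          simp [upSpec, h]]
      by_cases hr : rose = true ∧ x < prev
      · rw [show pvStep (0, prev, rose) x = (1, x, rose) from by simp [pvStep, h, hr]]
        rw [bfold_down t x rose]
        simp [hr.1, hr.2]
      · rw [show pvStep (0, prev, rose) x = (2, x, rose) from by simp [pvStep, h, hr]]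
        have h2 := bfold_fail t x rose
        constructor
        · intro hc; omega
        · intro hc
          simp only [Bool.and_eq_true, decide_eq_true_eq] at hc
          exact absurd ⟨hc.1.1, hc.1.2⟩ hr

theorem descFrom_two : ∀ (a b : Int) (t : List Int),
    descFrom (a :: b :: t) 0 ↔ (b < a ∧ descFrom (b :: t) 0) := by
  intro a b t
  unfold descFrom
  constructor
  · intro h
    constructor
    · have := h 0 (by omega) (by simp only [List.length_cons]; omega)
      simpa using this
    · intro i _ hlen
      have := h (i+1) (by omega) (by simp only [List.length_cons] at hlen ⊢; omega)
      simpa using this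
  · rintro ⟨hba, h⟩ i _ hlen
    cases i with
    | zero => simpa using hba
    | succ j =>
      have := h j (by omega) (by simp only [List.length_cons] at hlen ⊢; omega)
      simpa using this

theorem down_char : ∀ (t : List Int) (prev : Int),
    downSpec prev t = true ↔ descFrom (prev :: t) 0 := by
  intro t
  induction t with
  | nil =>
    intro prev
    constructor
    · intro _ i _ hlen
      simp only [List.length_cons, List.length_nil] at hlen; omega
    · intro _; rfl
  | cons x t ih =>
    intro prev
    rw [descFrom_two, show downSpec prev (x :: t) = (decide (x < prev) && downSpec x t) from rfl]
    simp only [Bool.and_eq_true, decide_eq_true_eq]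
    exact and_congr Iff.rfl (ih x)

theorem ascTo_cons_succ : ∀ (a : Int) (l : List Int) (p : Nat),
    ascTo (a :: l) (p+1) ↔ (a < l.getD 0 0 ∧ ascTo l p) := by
  intro a l p
  constructor
  · intro h
    refine ⟨by simpa using h 0 (by omega), ?_⟩
    intro i hi
    simpa using h (i+1) (by omega)
  · rintro ⟨h0, h⟩ i hi
    cases i with
    | zero => simpa using h0
    | succ j => simpa using h j (by omega)

theorem descFrom_cons_succ : ∀ (a : Int) (l : List Int) (p : Nat),
    descFrom (a :: l) (p+1) ↔ descFrom l p := by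
  intro a l p
  constructor
  · intro h i hpi hlen
    have := h (i+1) (by omega) (by simp only [List.length_cons] at hlen ⊢; omega)
    simpa using this
  · intro h i hpi hlen
    cases i with
    | zero => omega
    | succ j =>
      have := h j (by omega) (by simp only [List.length_cons] at hlen ⊢; omega)
      simpa using this

theorem up_char : ∀ (t : List Int) (prev : Int) (rose : Bool),
    upSpec prev t rose = true ↔
      ∃ p, (rose = true ∨ 0 < p) ∧ p + 1 < (prev :: t).length ∧ ascTo (prev :: t) p ∧ descFrom (prev :: t) p := by
  intro t
  induction t with
  | nil =>
    intro prev rose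
    constructor
    · intro hc; exact absurd hc (by simp [upSpec])
    · rintro ⟨p, _, hlen, _, _⟩
      simp only [List.length_cons, List.length_nil] at hlen; omega
  | cons x t ih =>
    intro prev rose
    by_cases h : prev < x
    · rw [show upSpec prev (x :: t) rose = upSpec x t true from by simp [upSpec, h]]
      rw [ih x true]
      constructor
      · rintro ⟨p', _, hlen, hasc, hdesc⟩
        refine ⟨p' + 1, Or.inr (by omega), by simp only [List.length_cons] at hlen ⊢; omega, ?_, ?_⟩
        · rw [ascTo_cons_succ]; exact ⟨by simpa using h, hasc⟩
        · rw [descFrom_cons_succ]; exact hdesc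
      · rintro ⟨p, _, hlen, hasc, hdesc⟩
        have hp : p ≠ 0 := by
          intro h0; subst h0
          have := hdesc 0 (by omega) (by simp only [List.length_cons]; omega)
          simp only [List.getD_cons_succ, List.getD_cons_zero] at this
          omega
        obtain ⟨p', rfl⟩ := Nat.exists_eq_succ_of_ne_zero hp
        rw [ascTo_cons_succ] at hasc
        rw [descFrom_cons_succ] at hdesc
        exact ⟨p', Or.inl rfl, by simp only [List.length_cons] at hlen ⊢; omega, hasc.2, hdesc⟩
    · rw [show upSpec prev (x :: t) rose = (rose && decide (x < prev) && downSpec x t) from by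
          simp [upSpec, h]]
      constructor
      · intro hc
        simp only [Bool.and_eq_true, decide_eq_true_eq] at hc
        obtain ⟨⟨hrose, hx⟩, hdown⟩ := hc
        refine ⟨0, Or.inl hrose, by simp only [List.length_cons]; omega,
                by intro i hi; omega, ?_⟩
        rw [descFrom_two]
        exact ⟨hx, (down_char t x).mp hdown⟩
      · rintro ⟨p, hro, hlen, hasc, hdesc⟩
        have hp : p = 0 := by
          by_contra hne
          have := hasc 0 (by omega)
          simp only [List.getD_cons_succ, List.getD_cons_zero] at this
          omega
        subst hp
        rw [descFrom_two] at hdesc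
        simp only [Bool.and_eq_true, decide_eq_true_eq]
        have hrose : rose = true := by
          rcases hro with hro | hro
          · exact hro
          · omega
        exact ⟨⟨hrose, hdesc.1⟩, (down_char t x).mpr hdesc.2⟩

theorem mtn_length : ∀ (xs : List Int), mtn xs → 3 ≤ xs.length := by
  rintro xs ⟨p, hp, hlen, _, _⟩
  omega

theorem alt_char : ∀ (xs : List Int), is_a_shaped_sequence_alt xs = true ↔ mtn xs := by
  intro xs
  unfold is_a_shaped_sequence_alt
  by_cases h3 : xs.length < 3
  · rw [if_pos h3]
    constructor
    · intro hc; exact absurd hc (by simp)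
    · intro hm; exact absurd (mtn_length xs hm) (by omega)
  · rw [if_neg h3]
    cases xs with
    | nil => simp at h3
    | cons h t =>
      rw [show (match h :: t with
            | [] => false
            | (h : Int) :: t => decide ((t.foldl pvStep (0, h, false)).1 = 1)) =
          decide ((t.foldl pvStep (0, h, false)).1 = 1) from rfl]
      rw [decide_eq_true_iff, bfold_up, up_char]
      constructor
      · rintro ⟨p, hro, hlen, hasc, hdesc⟩
        rcases hro with hro | hro
        · exact absurd hro (by simp)
        · exact ⟨p, hro, hlen, hasc, hdesc⟩
      · rintro ⟨p, hp, hlen, hasc, hdesc⟩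
        exact ⟨p, Or.inr hp, hlen, hasc, hdesc⟩

-- monotonicity consequences of ascTo / descFrom
theorem asc_mono (xs : List Int) (p : Nat) (h : ascTo xs p) :
    ∀ j, j ≤ p → ∀ i, i < j → xs.getD i 0 < xs.getD j 0 := by
  intro j
  induction j with
  | zero => intro _ i hi; omega
  | succ k ih =>
    intro hj i hi
    have hk : xs.getD k 0 < xs.getD (k+1) 0 := h k (by omega)
    by_cases hik : i = k
    · subst hik; exact hk
    · exact lt_trans (ih (by omega) i (by omega)) hk

theorem desc_mono (xs : List Int) (p : Nat) (h : descFrom xs p) :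
    ∀ j, j < xs.length → ∀ i, p ≤ i → i < j → xs.getD j 0 < xs.getD i 0 := by
  intro j
  induction j with
  | zero => intro _ i _ hi; omega
  | succ k ih =>
    intro hj i hpi hij
    have hk : xs.getD (k+1) 0 < xs.getD k 0 := h k (by omega) (by omega)
    by_cases hik : i = k
    · subst hik; exact hk
    · exact lt_trans hk (ih (by omega) i hpi (by omega))

theorem strict_max (xs : List Int) (p : Nat) (_hp : p + 1 < xs.length)
    (hasc : ascTo xs p) (hdesc : descFrom xs p) :
    ∀ j, j < xs.length → j ≠ p → xs.getD j 0 < xs.getD p 0 := by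
  intro j hj hne
  by_cases hlt : j < p
  · exact asc_mono xs p hasc p (le_refl p) j hlt
  · exact desc_mono xs p hdesc j hj p (le_refl p) (by omega)

theorem a_char : ∀ (xs : List Int), is_a_shaped_sequence xs = true ↔ mtn xs := by
  intro xs
  unfold is_a_shaped_sequence
  by_cases h3 : xs.length < 3
  · rw [if_pos h3]
    constructor
    · intro hc; exact absurd hc (by simp)
    · intro hm; exact absurd (mtn_length xs hm) (by omega)
  · rw [if_neg h3]
    have hne : xs ≠ [] := by intro hnil; subst hnil; simp at h3
    obtain ⟨m, hmax⟩ : ∃ m, PySem.List.max? xs (fun y => y) = some m := by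
      cases hm : PySem.List.max? xs (fun y => y) with
      | none => exact absurd ((PySem.List.max?_eq_none_iff xs _).mp hm) hne
      | some m => exact ⟨m, rfl⟩
    rw [hmax]
    simp only []
    have hmmem : m ∈ xs := PySem.List.max?_mem hmax
    obtain ⟨p, hidx⟩ : ∃ p, PySem.List.index? xs m = some p := by
      have hsome : (PySem.List.index? xs m).isSome = true :=
        (PySem.List.index?_isSome_iff xs m).mpr hmmem
      cases hi : PySem.List.index? xs m with
      | none => rw [hi] at hsome; simp at hsome
      | some p => exact ⟨p, rfl⟩
    rw [hidx]
    simp only []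
    obtain ⟨hplen, hpm, hfirst⟩ := PySem.List.getElem_of_index?_eq_some hidx
    constructor
    · -- A returns true → mountain
      intro hA
      by_cases hg : p = 0 ∨ p = xs.length - 1
      · rw [if_pos hg] at hA; exact absurd hA (by simp)
      · rw [if_neg hg] at hA
        simp only [Bool.and_eq_true, List.all_eq_true] at hA
        obtain ⟨hA1, hA2⟩ := hA
        refine ⟨p, by omega, by omega, ?_, ?_⟩
        · intro i hi
          have hmem : ((i : Int) + 1) ∈ PySem.List.pyRange 1 ((p : Int) + 1) 1 := by
            rw [PySem.List.mem_pyRange_one]; omega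
          have hstep := hA1 _ hmem
          simp only [Bool.not_eq_eq_eq_not, Bool.not_true, decide_eq_false_iff_not, not_le] at hstep
          rw [show (i : Int) + 1 - 1 = (i : Int) from by ring] at hstep
          rw [PySem.List.pyGetD_of_nonneg xs 0 (by omega),
              PySem.List.pyGetD_of_nonneg xs 0 (by omega)] at hstep
          rw [show ((i : Int)).toNat = i from by omega,
              show ((i : Int) + 1).toNat = i + 1 from by omega] at hstep
          exact hstep
        · intro i hpi hlen
          have hmem : ((i : Int) + 1) ∈ PySem.List.pyRange ((p : Int) + 1) (xs.length : Int) 1 := by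
            rw [PySem.List.mem_pyRange_one]; omega
          have hstep := hA2 _ hmem
          simp only [Bool.not_eq_eq_eq_not, Bool.not_true, decide_eq_false_iff_not, not_le] at hstep
          rw [show (i : Int) + 1 - 1 = (i : Int) from by ring] at hstep
          rw [PySem.List.pyGetD_of_nonneg xs 0 (by omega),
              PySem.List.pyGetD_of_nonneg xs 0 (by omega)] at hstep
          rw [show ((i : Int)).toNat = i from by omega,
              show ((i : Int) + 1).toNat = i + 1 from by omega] at hstep
          exact hstep
    · -- mountain → A returns true
      rintro ⟨q, hq0, hqlen, hasc, hdesc⟩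
      have hsm := strict_max xs q hqlen hasc hdesc
      have hqlt : q < xs.length := by omega
      -- the max value is xs[q]
      have hmax' : ∀ y ∈ xs, y ≤ m := PySem.List.max?_isMax hmax
      have hqm : xs.getD q 0 ≤ m := hmax' _ (by
        rw [List.getD_eq_getElem xs 0 hqlt]; exact List.getElem_mem hqlt)
      have hmq : m = xs.getD q 0 := by
        obtain ⟨j, hj, hjm⟩ := List.mem_iff_getElem.mp hmmem
        by_cases hjq : j = q
        · subst hjq; rw [← hjm, List.getD_eq_getElem xs 0 hj]
        · have := hsm j hj hjq
          rw [List.getD_eq_getElem xs 0 hj, hjm] at this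
          omega
      -- the first index of the max is q
      have hpq : p = q := by
        by_contra hpq
        by_cases hplt : p < q
        · have := hsm p hplen (by omega)
          rw [List.getD_eq_getElem xs 0 hplen, hpm, hmq] at this
          omega
        · have hne' : xs[q]'hqlt ≠ m := hfirst q (by omega)
          rw [hmq, List.getD_eq_getElem xs 0 hqlt] at hne'
          exact hne' rfl
      subst hpq
      have hg : ¬ (p = 0 ∨ p = xs.length - 1) := by omega
      rw [if_neg hg]
      simp only [Bool.and_eq_true, List.all_eq_true]
      constructor
      · intro j hj
        rw [PySem.List.mem_pyRange_one] at hj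
        simp only [Bool.not_eq_eq_eq_not, Bool.not_true, decide_eq_false_iff_not, not_le]
        rw [PySem.List.pyGetD_of_nonneg xs 0 (by omega),
            PySem.List.pyGetD_of_nonneg xs 0 (by omega)]
        have := hasc (j - 1).toNat (by omega)
        rw [show (j - 1).toNat + 1 = j.toNat from by omega] at this
        exact this
      · intro j hj
        rw [PySem.List.mem_pyRange_one] at hj
        simp only [Bool.not_eq_eq_eq_not, Bool.not_true, decide_eq_false_iff_not, not_le]
        rw [PySem.List.pyGetD_of_nonneg xs 0 (by omega),
            PySem.List.pyGetD_of_nonneg xs 0 (by omega)]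
        have := hdesc (j - 1).toNat (by omega) (by omega)
        rw [show (j - 1).toNat + 1 = j.toNat from by omega] at this
        exact this

-- ===== VERDICT (by name: the statement is the Claim_ definition above) =====
theorem is_a_shaped_sequence_spec : Claim_equal_is_a_shaped_sequence := by
  intro numbers _
  unfold Spec_is_a_shaped_sequence
  have hA := a_char numbers
  have hB := alt_char numbers
  cases hb : is_a_shaped_sequence_alt numbers
  · cases ha : is_a_shaped_sequence numbers
    · rfl
    · exact absurd (hB.mpr (hA.mp ha)) (by simp [hb])
  · exact hA.mpr (hB.mp hb)
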